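-- pv_equiv track=rewrite | github.com/Xingye3451/AiEmpowerment | backend/app/core/ai_services.py | _extract_text_areas
-- ===== SOURCE A (Python) =====
-- def _extract_text_areas(ocr_result):
--     text_areas = []
--     for line in ocr_result:
--         points = line[0]
--         text_areas.append(
--             {
--                 "x": min(p[0] for p in points),
--                 "y": min(p[1] for p in points),
--                 "width": max(p[0] for p in points) - min(p[0] for p in points),
--                 "height": max(p[1] for p in points) - min(p[1] for p in points),
--             }
--         )
--     return text_areas
-- ===== SOURCE B (Python) =====
-- def _extract_text_areas(ocr_result):
--     areas = []
--     for line in ocr_result: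
--         xs = sorted(p[0] for p in line[0])
--         ys = sorted(p[1] for p in line[0])
--         areas.append({"x": xs[0], "y": ys[0],
--                       "width": xs[-1] - xs[0], "height": ys[-1] - ys[0]})
--     return areas
-- ===== Notes on version B (the rewrite author's own statement) =====
-- stated objective: alternative
-- what changed: Instead of six min()/max() scans per line, B sorts each line's x and y coordinate lists once and reads the bounding box off the sorted ends (first = min, last = max).
import Mathlib
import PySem

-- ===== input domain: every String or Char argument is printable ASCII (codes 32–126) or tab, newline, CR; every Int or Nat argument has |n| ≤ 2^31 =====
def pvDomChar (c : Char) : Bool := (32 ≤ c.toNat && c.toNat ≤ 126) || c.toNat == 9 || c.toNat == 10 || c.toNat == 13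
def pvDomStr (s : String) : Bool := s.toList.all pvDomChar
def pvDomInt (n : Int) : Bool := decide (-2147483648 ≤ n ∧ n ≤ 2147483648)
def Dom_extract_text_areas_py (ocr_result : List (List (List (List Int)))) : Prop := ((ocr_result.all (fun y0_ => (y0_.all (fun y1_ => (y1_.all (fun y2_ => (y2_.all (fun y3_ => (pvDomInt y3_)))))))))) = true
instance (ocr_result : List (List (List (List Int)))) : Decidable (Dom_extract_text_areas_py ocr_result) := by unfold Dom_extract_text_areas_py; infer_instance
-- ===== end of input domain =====

-- B computes each line's bounding box by sorting the x and y coordinate lists and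
-- reading the ends (first = min, last = max) instead of A's six min()/max() scans
-- (objective: alternative algorithm, similar cost).

-- ===== PORT A =====
-- line[0], p[0], p[1] via pyGet? (getD defaults never reached inside Pre_);
-- min(...)/max(...) via PySem.List.min?/max? with identity key.
def extract_text_areas_py (ocr_result : List (List (List (List Int)))) : List (List (String × Int)) :=
  ocr_result.foldl
    (fun text_areas line =>
      let points := (PySem.List.pyGet? line 0).getD []
      text_areas ++
        [[("x", (PySem.List.min? (points.map (fun p => (PySem.List.pyGet? p 0).getD 0)) (fun v => v)).getD 0),
          ("y", (PySem.List.min? (points.map (fun p => (PySem.List.pyGet? p 1).getD 0)) (fun v => v)).getD 0),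
          ("width", (PySem.List.max? (points.map (fun p => (PySem.List.pyGet? p 0).getD 0)) (fun v => v)).getD 0
                    - (PySem.List.min? (points.map (fun p => (PySem.List.pyGet? p 0).getD 0)) (fun v => v)).getD 0),
          ("height", (PySem.List.max? (points.map (fun p => (PySem.List.pyGet? p 1).getD 0)) (fun v => v)).getD 0
                    - (PySem.List.min? (points.map (fun p => (PySem.List.pyGet? p 1).getD 0)) (fun v => v)).getD 0)]])
    []

-- ===== PORT B =====
-- sorted(...) via PySem.List.sorted with identity key; xs[0], xs[-1] via pyGet?.
def extract_text_areas_py_alt (ocr_result : List (List (List (List Int)))) : List (List (String × Int)) :=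
  ocr_result.foldl
    (fun areas line =>
      let pts := (PySem.List.pyGet? line 0).getD []
      let xs := PySem.List.sorted (pts.map (fun p => (PySem.List.pyGet? p 0).getD 0)) (fun v => v) false
      let ys := PySem.List.sorted (pts.map (fun p => (PySem.List.pyGet? p 1).getD 0)) (fun v => v) false
      areas ++
        [[("x", (PySem.List.pyGet? xs 0).getD 0),
          ("y", (PySem.List.pyGet? ys 0).getD 0),
          ("width", (PySem.List.pyGet? xs (-1)).getD 0 - (PySem.List.pyGet? xs 0).getD 0),
          ("height", (PySem.List.pyGet? ys (-1)).getD 0 - (PySem.List.pyGet? ys 0).getD 0)]])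
    []

-- ===== PRECONDITION & SPEC =====
-- Pre_ excludes exactly the inputs where Python A raises: an empty line (IndexError
-- on line[0]), an empty points list (ValueError from min()), or a point with fewer
-- than two coordinates (IndexError on p[0]/p[1]).
def Pre_extract_text_areas_py (ocr_result : List (List (List (List Int)))) : Prop :=
  ∀ line ∈ ocr_result, line ≠ [] ∧ line.headD [] ≠ [] ∧ ∀ p ∈ line.headD [], 2 ≤ p.length
instance (ocr_result : List (List (List (List Int)))) : Decidable (Pre_extract_text_areas_py ocr_result) := by unfold Pre_extract_text_areas_py; infer_instance

def pvWitness_extract_text_areas_py : List (List (List (List Int))) :=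
  [[[[0, 0], [4, 1], [2, 3]]], [[[1, 1], [5, 5]]]]

def Spec_extract_text_areas_py (ocr_result : List (List (List (List Int)))) (out : List (List (String × Int))) : Prop := out = extract_text_areas_py_alt ocr_result
instance (ocr_result : List (List (List (List Int)))) (out : List (List (String × Int))) : Decidable (Spec_extract_text_areas_py ocr_result out) := by unfold Spec_extract_text_areas_py; infer_instance

-- ===== CLAIM (what is proved, stated in full; the proofs are below) =====
def Claim_equal_extract_text_areas_py : Prop := ∀ (ocr_result : List (List (List (List Int)))), Dom_extract_text_areas_py ocr_result → Pre_extract_text_areas_py ocr_result → Spec_extract_text_areas_py ocr_result (extract_text_areas_py ocr_result)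

-- ===== LEMMAS AND PROOFS =====

-- the append-accumulator foldl of both ports is a map
theorem pv_foldl_append_map {α β : Type} (f : α → β) :
    ∀ (l : List α) (acc : List β),
      l.foldl (fun a x => a ++ [f x]) acc = acc ++ l.map f := by
  intro l
  induction l with
  | nil => simp
  | cons x t ih => intro acc; simp [List.foldl, ih]

-- foldl min/max: membership and extremality
theorem pv_foldl_min_mem (t : List Int) : ∀ v : Int, t.foldl min v ∈ v :: t := by
  induction t with
  | nil => intro v; simp
  | cons x s ih =>
    intro v
    have h := ih (min v x)
    simp only [List.foldl]
    rcases List.mem_cons.mp h with h1 | h1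
    · rcases min_choice v x with he | he
      · rw [h1, he]; exact List.mem_cons_self
      · rw [h1, he]; simp
    · simp [h1]

theorem pv_foldl_min_le (t : List Int) : ∀ v y : Int, y ∈ v :: t → t.foldl min v ≤ y := by
  induction t with
  | nil => intro v y hy; simp at hy; simp [hy]
  | cons x s ih =>
    intro v y hy
    have hmin : s.foldl min (min v x) ≤ min v x := ih (min v x) _ List.mem_cons_self
    simp only [List.foldl]
    rcases List.mem_cons.mp hy with h1 | h1
    · rw [h1]; exact le_trans hmin (min_le_left v x)
    rcases List.mem_cons.mp h1 with h2 | h2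
    · rw [h2]; exact le_trans hmin (min_le_right v x)
    · exact ih (min v x) y (List.mem_cons_of_mem _ h2)

theorem pv_foldl_max_mem (t : List Int) : ∀ v : Int, t.foldl max v ∈ v :: t := by
  induction t with
  | nil => intro v; simp
  | cons x s ih =>
    intro v
    have h := ih (max v x)
    simp only [List.foldl]
    rcases List.mem_cons.mp h with h1 | h1
    · rcases max_choice v x with he | he
      · rw [h1, he]; exact List.mem_cons_self
      · rw [h1, he]; simp
    · simp [h1]

theorem pv_foldl_max_ge (t : List Int) : ∀ v y : Int, y ∈ v :: t → y ≤ t.foldl max v := by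
  induction t with
  | nil => intro v y hy; simp at hy; simp [hy]
  | cons x s ih =>
    intro v y hy
    have hmax : max v x ≤ s.foldl max (max v x) := ih (max v x) _ List.mem_cons_self
    simp only [List.foldl]
    rcases List.mem_cons.mp hy with h1 | h1
    · rw [h1]; exact le_trans (le_max_left v x) hmax
    rcases List.mem_cons.mp h1 with h2 | h2
    · rw [h2]; exact le_trans (le_max_right v x) hmax
    · exact ih (max v x) y (List.mem_cons_of_mem _ h2)

-- xs[-1] is the last element
theorem pv_pyGet_neg_one (l : List Int) : PySem.List.pyGet? l (-1) = l.getLast? := by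
  cases l.eq_nil_or_concat with
  | inl h => subst h; simp [PySem.List.pyGet?, PySem.List.pyIdx?]
  | inr h => obtain ⟨t, x, rfl⟩ := h; simp [PySem.List.pyGet?, PySem.List.pyIdx?]

-- in a ≤-sorted list every element is at most the last one
theorem pv_pairwise_le_getLast :
    ∀ (l : List Int), l.Pairwise (· ≤ ·) → ∀ (hne : l ≠ []) (y : Int), y ∈ l → y ≤ l.getLast hne := by
  intro l
  induction l with
  | nil => intro _ hne; exact absurd rfl hne
  | cons a u ih =>
    intro hpw hne y hy
    rcases List.mem_cons.mp hy with h1 | h1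
    · subst h1
      cases u with
      | nil => simp [List.getLast]
      | cons b w =>
        have hab : y ≤ b := (List.pairwise_cons.mp hpw).1 b List.mem_cons_self
        have hb := ih (List.pairwise_cons.mp hpw).2 (by simp) b List.mem_cons_self
        rw [List.getLast_cons (by simp)]
        exact le_trans hab hb
    · cases u with
      | nil => simp at h1
      | cons b w =>
        rw [List.getLast_cons (by simp)]
        exact ih (List.pairwise_cons.mp hpw).2 (by simp) y h1

-- head of sorted = running min (= min(...) of A)
theorem pv_sorted_head (v : Int) (t : List Int) :
    (PySem.List.pyGet? (PySem.List.sorted (v :: t) (fun x => x) false) 0).getD 0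
      = t.foldl min v := by
  rcases hs : PySem.List.sorted (v :: t) (fun x => x) false with _ | ⟨m, rest⟩
  · exact absurd ((PySem.List.sorted_eq_nil_iff _ _ _).mp hs) (by simp)
  have hmle := PySem.List.key_head_sorted_le (v :: t) (fun x => x) hs
  have hmem : m ∈ v :: t := by
    have hm : m ∈ PySem.List.sorted (v :: t) (fun x => x) false := by rw [hs]; simp
    exact (PySem.List.mem_sorted _ _ _ _).mp hm
  have h1 : m ≤ t.foldl min v := hmle _ (pv_foldl_min_mem t v)
  have h2 : t.foldl min v ≤ m := pv_foldl_min_le t v m hmem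
  rw [PySem.List.pyGet?_zero_cons, Option.getD_some]
  omega

-- last of sorted = running max (= max(...) of A)
theorem pv_sorted_last (v : Int) (t : List Int) :
    (PySem.List.pyGet? (PySem.List.sorted (v :: t) (fun x => x) false) (-1)).getD 0
      = t.foldl max v := by
  have hne : PySem.List.sorted (v :: t) (fun x => x) false ≠ [] := by
    rw [Ne, PySem.List.sorted_eq_nil_iff]; simp
  have hpw : (PySem.List.sorted (v :: t) (fun x => x) false).Pairwise (· ≤ ·) := by
    simpa using PySem.List.sorted_pairwise (v :: t) (fun x : Int => x)
  have hlast_mem : (PySem.List.sorted (v :: t) (fun x => x) false).getLast hne ∈ v :: t :=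
    (PySem.List.mem_sorted _ _ _ _).mp (List.getLast_mem hne)
  have h1 : (PySem.List.sorted (v :: t) (fun x => x) false).getLast hne ≤ t.foldl max v :=
    pv_foldl_max_ge t v _ hlast_mem
  have h2 : t.foldl max v ≤ (PySem.List.sorted (v :: t) (fun x => x) false).getLast hne :=
    pv_pairwise_le_getLast _ hpw hne _ ((PySem.List.mem_sorted _ _ _ _).mpr (pv_foldl_max_mem t v))
  rw [pv_pyGet_neg_one, List.getLast?_eq_some_getLast hne]
  simp; omega

-- ===== VERDICT (by name: the statement is the Claim_ definition above) =====
theorem extract_text_areas_py_spec : Claim_equal_extract_text_areas_py := by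
  intro ocr _hdom hpre
  unfold Spec_extract_text_areas_py extract_text_areas_py extract_text_areas_py_alt
  rw [pv_foldl_append_map, pv_foldl_append_map]
  simp only [List.nil_append]
  apply List.map_congr_left
  intro line hline
  obtain ⟨hne, hpts, _⟩ := hpre line hline
  cases line with
  | nil => exact absurd rfl hne
  | cons pts lrest =>
    simp only [List.headD] at hpts
    cases pts with
    | nil => exact absurd rfl hpts
    | cons q qs =>
      simp only [PySem.List.pyGet?_zero_cons, Option.getD_some, List.map]
      rw [PySem.List.min?_id_cons, PySem.List.min?_id_cons,
        PySem.List.max?_id_cons, PySem.List.max?_id_cons,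
        pv_sorted_head, pv_sorted_head, pv_sorted_last, pv_sorted_last]
      simp
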